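-- pv_equiv track=rewrite | github.com/kevinmildau/specXplore | specxplore/egonet.py | create_node_dict
-- ===== SOURCE A (Python) =====
-- def create_node_dict(node_list, edge_dict):
--     """Creates node dict from node_list and edge_dict objects."""
--     node_dict = dict()
--     for node in node_list:
--         tmp = set()
--         for edge_key in edge_dict:
--             if node == edge_dict[edge_key][0] or node == edge_dict[edge_key][1]:
--                 tmp.add(edge_key)
--         node_dict[str(node)] = tmp
--     return node_dict
-- ===== SOURCE B (Python) =====
-- def create_node_dict(node_list, edge_dict):
--     """Creates node dict from node_list and edge_dict objects."""
--     index = {}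
--     for edge_key in edge_dict:
--         s = edge_dict[edge_key][0]
--         t = edge_dict[edge_key][1]
--         index.setdefault(s, set()).add(edge_key)
--         index.setdefault(t, set()).add(edge_key)
--     return {str(node): index.get(node, set()) for node in node_list}
-- ===== Notes on version B (the rewrite author's own statement) =====
-- stated objective: faster
-- what changed: B indexes the edges once by each endpoint into a dict of sets and then does one O(1) lookup per node, instead of rescanning the whole edge dict for every node.
import Mathlib
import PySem

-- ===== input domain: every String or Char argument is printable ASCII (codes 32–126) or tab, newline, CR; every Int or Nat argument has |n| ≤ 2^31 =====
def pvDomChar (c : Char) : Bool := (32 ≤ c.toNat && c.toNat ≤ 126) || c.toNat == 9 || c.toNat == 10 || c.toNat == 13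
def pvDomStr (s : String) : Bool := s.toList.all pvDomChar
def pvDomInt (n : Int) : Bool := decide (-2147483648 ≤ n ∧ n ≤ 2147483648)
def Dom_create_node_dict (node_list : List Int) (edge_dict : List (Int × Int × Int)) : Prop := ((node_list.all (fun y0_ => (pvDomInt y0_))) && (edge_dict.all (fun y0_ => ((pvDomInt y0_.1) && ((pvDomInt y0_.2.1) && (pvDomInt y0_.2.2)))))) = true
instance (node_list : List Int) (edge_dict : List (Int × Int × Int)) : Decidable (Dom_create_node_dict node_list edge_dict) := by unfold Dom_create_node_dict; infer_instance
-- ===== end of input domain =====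

-- B builds an endpoint→edge-keys index in one pass over the edges, then one lookup per node,
-- instead of A's rescan of the whole edge dict for every node.

-- ===== PORT A =====
-- the dict iteration 'for edge_key in edge_dict' + 'edge_dict[edge_key]' walks the items in order
def create_node_dict (node_list : List Int) (edge_dict : List (Int × Int × Int)) : List (String × List Int) :=
  (node_list.foldl (fun node_dict node =>
      node_dict.insert (PySem.Int.toStr node)
        (edge_dict.foldl (fun tmp e =>
            if node == e.2.1 || node == e.2.2 then PySem.Set.add tmp e.1 else tmp)
          PySem.Set.empty))
    PySem.Dict.empty).items

-- ===== PORT B =====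
def cndIndex (edge_dict : List (Int × Int × Int)) : PySem.Dict Int (PySem.Set Int) :=
  edge_dict.foldl (fun idx e =>
      (idx.modify e.2.1 PySem.Set.empty (fun s => PySem.Set.add s e.1)).modify e.2.2 PySem.Set.empty (fun s => PySem.Set.add s e.1))
    PySem.Dict.empty

def create_node_dict_alt (node_list : List Int) (edge_dict : List (Int × Int × Int)) : List (String × List Int) :=
  (node_list.foldl (fun out node =>
      out.insert (PySem.Int.toStr node) ((cndIndex edge_dict).getD node PySem.Set.empty))
    PySem.Dict.empty).items

-- ===== PRECONDITION & SPEC =====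
def Spec_create_node_dict (node_list : List Int) (edge_dict : List (Int × Int × Int)) (out : List (String × List Int)) : Prop := out = create_node_dict_alt node_list edge_dict
instance (node_list : List Int) (edge_dict : List (Int × Int × Int)) (out : List (String × List Int)) : Decidable (Spec_create_node_dict node_list edge_dict out) := by unfold Spec_create_node_dict; infer_instance

-- ===== CLAIM (what is proved, stated in full; the proofs are below) =====
def Claim_equal_create_node_dict : Prop := ∀ (node_list : List Int) (edge_dict : List (Int × Int × Int)), Dom_create_node_dict node_list edge_dict → Spec_create_node_dict node_list edge_dict (create_node_dict node_list edge_dict)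

-- ===== LEMMAS AND PROOFS =====

-- the index's entry for n is exactly A's inner scan over the edges
lemma cndIndex_getD (es : List (Int × Int × Int)) (n : Int) :
    ∀ d : PySem.Dict Int (PySem.Set Int),
      (es.foldl (fun idx e =>
          (idx.modify e.2.1 PySem.Set.empty (fun s => PySem.Set.add s e.1)).modify e.2.2 PySem.Set.empty (fun s => PySem.Set.add s e.1)) d).getD n PySem.Set.empty
        = es.foldl (fun tmp e =>
            if n == e.2.1 || n == e.2.2 then PySem.Set.add tmp e.1 else tmp) (d.getD n PySem.Set.empty) := by
  induction es with
  | nil => intro d; rfl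
  | cons e es ih =>
    intro d
    simp only [List.foldl_cons, ih]
    congr 1
    by_cases h1 : n = e.2.1 <;> by_cases h2 : n = e.2.2 <;> by_cases h3 : e.2.2 = e.2.1 <;>
      simp_all [PySem.Dict.getD_modify]

-- ===== VERDICT (by name: the statement is the Claim_ definition above) =====
theorem create_node_dict_spec : Claim_equal_create_node_dict := by
  intro node_list edge_dict _
  unfold Spec_create_node_dict create_node_dict create_node_dict_alt
  have h : ∀ node : Int,
      (edge_dict.foldl (fun tmp e =>
          if node == e.2.1 || node == e.2.2 then PySem.Set.add tmp e.1 else tmp) PySem.Set.empty)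
        = (cndIndex edge_dict).getD node PySem.Set.empty := by
    intro node
    unfold cndIndex
    rw [cndIndex_getD]
    simp [PySem.Dict.getD_empty]
  simp only [h]
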